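-- pv_equiv track=rewrite | github.com/sujayyy/Medicare-Excellence | backend/services/model_intelligence_service.py | _baseline_specialty
-- ===== SOURCE A (Python) =====
-- def _baseline_specialty(text: str) -> str:
--     lowered = (text or "").lower()
--     if any(token in lowered for token in ["chest pain", "left arm", "palpitations", "blood pressure"]):
--         return "cardiology"
--     if any(token in lowered for token in ["headache", "blurred vision", "seizure", "dizziness"]):
--         return "neurology"
--     if any(token in lowered for token in ["cough", "breathing", "shortness of breath"]):
--         return "pulmonology"
--     if any(token in lowered for token in ["stomach", "abdominal pain", "vomiting"]):
--         return "gastroenterology"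
--     if any(token in lowered for token in ["rash", "itching", "skin"]):
--         return "dermatology"
--     if any(token in lowered for token in ["period", "delivery", "pregnancy", "pelvic"]):
--         return "gynecology"
--     if any(token in lowered for token in ["diabetes", "glucose", "sugar", "thyroid"]):
--         return "endocrinology"
--     if any(token in lowered for token in ["urine", "kidney", "swelling"]):
--         return "nephrology"
--     if any(token in lowered for token in ["throat", "ear", "nose", "sore throat"]):
--         return "ent"
--     return "general_medicine"
-- ===== SOURCE B (Python) =====
-- SPECIALTIES = [
--     "cardiology", "neurology", "pulmonology", "gastroenterology",
--     "dermatology", "gynecology", "endocrinology", "nephrology",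
--     "ent", "general_medicine",
-- ]
--
-- # flat keyword -> priority rank (index into SPECIALTIES)
-- TOKEN_RANK = {
--     "chest pain": 0, "left arm": 0, "palpitations": 0, "blood pressure": 0,
--     "headache": 1, "blurred vision": 1, "seizure": 1, "dizziness": 1,
--     "cough": 2, "breathing": 2, "shortness of breath": 2,
--     "stomach": 3, "abdominal pain": 3, "vomiting": 3,
--     "rash": 4, "itching": 4, "skin": 4,
--     "period": 5, "delivery": 5, "pregnancy": 5, "pelvic": 5,
--     "diabetes": 6, "glucose": 6, "sugar": 6, "thyroid": 6,
--     "urine": 7, "kidney": 7, "swelling": 7,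
--     "throat": 8, "ear": 8, "nose": 8, "sore throat": 8,
-- }
--
-- def _baseline_specialty(text: str) -> str:
--     # One left-to-right scan of the text: at each position, see which keywords
--     # start there and keep the minimum priority rank seen anywhere.
--     lowered = (text or "").lower()
--     best = len(SPECIALTIES) - 1
--     for i in range(len(lowered) + 1):
--         for token, rank in TOKEN_RANK.items():
--             if rank < best and lowered.startswith(token, i):
--                 best = rank
--     return SPECIALTIES[best]
-- ===== Notes on version B (the rewrite author's own statement) =====
-- stated objective: alternative
-- what changed: Replaced the nine ordered per-token substring-search branches by a single left-to-right position scan of the text that tests which keywords start at each position (naive multi-pattern matching over a flat token-to-rank map) while maintaining a minimum-priority accumulator, then indexes the specialty table with the final rank.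
import Mathlib
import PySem

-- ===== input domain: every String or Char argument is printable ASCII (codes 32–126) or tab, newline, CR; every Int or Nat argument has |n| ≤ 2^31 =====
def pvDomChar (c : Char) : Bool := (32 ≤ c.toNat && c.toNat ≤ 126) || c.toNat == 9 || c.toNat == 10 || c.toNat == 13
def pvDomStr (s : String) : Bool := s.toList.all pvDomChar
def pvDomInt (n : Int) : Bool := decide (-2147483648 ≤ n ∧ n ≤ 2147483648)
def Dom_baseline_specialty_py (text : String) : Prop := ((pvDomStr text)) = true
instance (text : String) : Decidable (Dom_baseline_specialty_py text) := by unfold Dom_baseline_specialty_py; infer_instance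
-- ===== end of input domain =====

-- B replaces A's nine ordered per-token substring-search branches by a single left-to-right
-- position scan of the text (which keywords start at each position) with a minimum-priority
-- accumulator over a flat token->rank table, then indexes the specialty list by the final rank.

-- ===== PORT A =====
def baseline_specialty_py (text : String) : String :=
  let lowered := PySem.Str.lower text  -- (text or "") is text itself for str: "" stays ""
  if ["chest pain", "left arm", "palpitations", "blood pressure"
     ].any (fun token => PySem.Str.isIn token lowered) then "cardiology"
  else if ["headache", "blurred vision", "seizure", "dizziness"
     ].any (fun token => PySem.Str.isIn token lowered) then "neurology"
  else if ["cough", "breathing", "shortness of breath"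
     ].any (fun token => PySem.Str.isIn token lowered) then "pulmonology"
  else if ["stomach", "abdominal pain", "vomiting"
     ].any (fun token => PySem.Str.isIn token lowered) then "gastroenterology"
  else if ["rash", "itching", "skin"
     ].any (fun token => PySem.Str.isIn token lowered) then "dermatology"
  else if ["period", "delivery", "pregnancy", "pelvic"
     ].any (fun token => PySem.Str.isIn token lowered) then "gynecology"
  else if ["diabetes", "glucose", "sugar", "thyroid"
     ].any (fun token => PySem.Str.isIn token lowered) then "endocrinology"
  else if ["urine", "kidney", "swelling"
     ].any (fun token => PySem.Str.isIn token lowered) then "nephrology"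
  else if ["throat", "ear", "nose", "sore throat"
     ].any (fun token => PySem.Str.isIn token lowered) then "ent"
  else "general_medicine"

-- ===== PORT B =====
def pvSpecs : List String :=
  ["cardiology", "neurology", "pulmonology", "gastroenterology",
   "dermatology", "gynecology", "endocrinology", "nephrology",
   "ent", "general_medicine"]

-- flat keyword -> priority rank table (dict iteration = insertion order)
def pvTokenRank : List (String × Nat) :=
  [("chest pain", 0), ("left arm", 0), ("palpitations", 0), ("blood pressure", 0),
   ("headache", 1), ("blurred vision", 1), ("seizure", 1), ("dizziness", 1),
   ("cough", 2), ("breathing", 2), ("shortness of breath", 2),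
   ("stomach", 3), ("abdominal pain", 3), ("vomiting", 3),
   ("rash", 4), ("itching", 4), ("skin", 4),
   ("period", 5), ("delivery", 5), ("pregnancy", 5), ("pelvic", 5),
   ("diabetes", 6), ("glucose", 6), ("sugar", 6), ("thyroid", 6),
   ("urine", 7), ("kidney", 7), ("swelling", 7),
   ("throat", 8), ("ear", 8), ("nose", 8), ("sore throat", 8)]

-- the double loop of Source B: for i in range(..): for token, rank in TOKEN_RANK.items(): ...
-- Python's lowered.startswith(token, i) is ported by hand as a prefix test on drop i
-- (exact for 0 ≤ i ≤ len(lowered), which range(len(lowered)+1) guarantees).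
def pvScan (s : List Char) (I : List Int) (b0 : Nat) : Nat :=
  I.foldl (fun b i =>
    pvTokenRank.foldl (fun b tr =>
      if tr.2 < b ∧ PySem.Chars.startswith (s.drop i.toNat) tr.1.toList = true then tr.2 else b) b) b0

def baseline_specialty_py_alt (text : String) : String :=
  let lowered := PySem.Str.lower text
  let best := pvScan lowered.toList
      (PySem.List.pyRange 0 (PySem.Str.len lowered + 1) 1) (pvSpecs.length - 1)
  -- SPECIALTIES[best]: best ≤ 9 < 10 always, so this lookup never fails
  (PySem.List.pyGet? pvSpecs (best : Int)).getD ""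

-- ===== PRECONDITION & SPEC =====
def Spec_baseline_specialty_py (text : String) (out : String) : Prop := out = baseline_specialty_py_alt text
instance (text : String) (out : String) : Decidable (Spec_baseline_specialty_py text out) := by unfold Spec_baseline_specialty_py; infer_instance

-- ===== CLAIM (what is proved, stated in full; the proofs are below) =====
def Claim_equal_baseline_specialty_py : Prop := ∀ (text : String), Dom_baseline_specialty_py text → Spec_baseline_specialty_py text (baseline_specialty_py text)

-- ===== LEMMAS AND PROOFS =====

-- A's keyword groups, in priority order (proof-side view of A's nine literal lists)
def pvGroups : List (List String) :=
  [["chest pain", "left arm", "palpitations", "blood pressure"],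
   ["headache", "blurred vision", "seizure", "dizziness"],
   ["cough", "breathing", "shortness of breath"],
   ["stomach", "abdominal pain", "vomiting"],
   ["rash", "itching", "skin"],
   ["period", "delivery", "pregnancy", "pelvic"],
   ["diabetes", "glucose", "sugar", "thyroid"],
   ["urine", "kidney", "swelling"],
   ["throat", "ear", "nose", "sore throat"]]

lemma pvTokens_sound : ∀ tr ∈ pvTokenRank, tr.2 < 9 ∧ tr.1 ∈ pvGroups.getD tr.2 [] := by decide

lemma pvGroups_complete : ∀ j, j < 9 → ∀ t ∈ pvGroups.getD j [], (t, j) ∈ pvTokenRank := by decide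

-- generic min-fold facts
lemma pvMinFold_le {α : Type} (p : α → Bool) (r : α → Nat) (L : List α) :
    ∀ b : Nat, L.foldl (fun b x => if r x < b ∧ p x = true then r x else b) b ≤ b := by
  induction L with
  | nil => intro b; simp
  | cons y L ih =>
    intro b
    simp only [List.foldl_cons]
    refine le_trans (ih _) ?_
    by_cases hc : r y < b ∧ p y = true
    · rw [if_pos hc]; exact Nat.le_of_lt hc.1
    · rw [if_neg hc]

lemma pvMinFold_le_of_mem {α : Type} (p : α → Bool) (r : α → Nat) (L : List α) :
    ∀ (b : Nat) (x : α), x ∈ L → p x = true →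
      L.foldl (fun b x => if r x < b ∧ p x = true then r x else b) b ≤ r x := by
  induction L with
  | nil => intro b x hx; cases hx
  | cons y L ih =>
    intro b x hx hp
    simp only [List.foldl_cons]
    rcases List.mem_cons.mp hx with rfl | hmem
    · refine le_trans (pvMinFold_le p r L _) ?_
      by_cases hc : r x < b ∧ p x = true
      · rw [if_pos hc]
      · rw [if_neg hc]
        have : ¬ r x < b := fun h => hc ⟨h, hp⟩
        omega
    · exact ih _ x hmem hp

lemma pvMinFold_cases {α : Type} (p : α → Bool) (r : α → Nat) (L : List α) :
    ∀ b : Nat, L.foldl (fun b x => if r x < b ∧ p x = true then r x else b) b = b ∨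
      ∃ x ∈ L, p x = true ∧ L.foldl (fun b x => if r x < b ∧ p x = true then r x else b) b = r x := by
  induction L with
  | nil => intro b; left; rfl
  | cons y L ih =>
    intro b
    simp only [List.foldl_cons]
    rcases ih (if r y < b ∧ p y = true then r y else b) with h | ⟨x, hx, hp, he⟩
    · by_cases hc : r y < b ∧ p y = true
      · right; exact ⟨y, List.mem_cons_self, hc.2, by rw [h, if_pos hc]⟩
      · left; rw [h, if_neg hc]
    · right; exact ⟨x, List.mem_cons_of_mem _ hx, hp, he⟩

-- scan facts
lemma pvScan_le (s : List Char) (I : List Int) : ∀ b : Nat, pvScan s I b ≤ b := by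
  unfold pvScan
  induction I with
  | nil => intro b; simp
  | cons i I ih =>
    intro b
    simp only [List.foldl_cons]
    exact le_trans (ih _) (pvMinFold_le _ _ _ _)

lemma pvScan_le_of_mem (s : List Char) (I : List Int) :
    ∀ (b : Nat) (i : Int) (tr : String × Nat), i ∈ I → tr ∈ pvTokenRank →
      PySem.Chars.startswith (s.drop i.toNat) tr.1.toList = true → pvScan s I b ≤ tr.2 := by
  unfold pvScan
  induction I with
  | nil => intro b i tr hi; cases hi
  | cons j I ih =>
    intro b i tr hi htr hsw
    simp only [List.foldl_cons]
    rcases List.mem_cons.mp hi with rfl | hmem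
    · refine le_trans (by exact pvScan_le s I _) ?_
      exact pvMinFold_le_of_mem _ _ _ _ tr htr hsw
    · exact ih _ i tr hmem htr hsw

lemma pvScan_cases (s : List Char) (I : List Int) :
    ∀ b : Nat, pvScan s I b = b ∨
      ∃ i ∈ I, ∃ tr ∈ pvTokenRank,
        PySem.Chars.startswith (s.drop i.toNat) tr.1.toList = true ∧ pvScan s I b = tr.2 := by
  unfold pvScan
  induction I with
  | nil => intro b; left; rfl
  | cons j I ih =>
    intro b
    simp only [List.foldl_cons]
    rcases ih (pvTokenRank.foldl (fun b tr =>
        if tr.2 < b ∧ PySem.Chars.startswith (s.drop j.toNat) tr.1.toList = true then tr.2 else b) b)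
      with h | ⟨i, hi, tr, htr, hsw, he⟩
    · rcases pvMinFold_cases (fun tr => PySem.Chars.startswith (s.drop j.toNat) tr.1.toList)
        Prod.snd pvTokenRank b with h2 | ⟨x, hx, hp, he⟩
      · left; rw [h]; exact h2
      · right; exact ⟨j, List.mem_cons_self, x, hx, hp, by rw [h]; exact he⟩
    · right; exact ⟨i, List.mem_cons_of_mem _ hi, tr, htr, hsw, he⟩

-- bridge: a token occurs somewhere in s iff it starts at some scanned position
lemma pvMatched_iff (s : List Char) (t : String) :
    PySem.Chars.isIn t.toList s = true ↔
      ∃ i ∈ PySem.List.pyRange 0 ((s.length : Int) + 1) 1,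
        PySem.Chars.startswith (s.drop i.toNat) t.toList = true := by
  constructor
  · intro h
    obtain ⟨j, hj⟩ := (PySem.Chars.exists_prefix_drop_iff_isIn t.toList s).mpr h
    refine ⟨(min j s.length : Nat), ?_, ?_⟩
    · rw [PySem.List.mem_pyRange_one]
      constructor
      · positivity
      · have : min j s.length ≤ s.length := Nat.min_le_right _ _
        push_cast; omega
    · rw [PySem.Chars.startswith_iff]
      have hN : ((min j s.length : Nat) : Int).toNat = min j s.length := by omega
      rw [hN]
      by_cases hle : j ≤ s.length
      · rwa [Nat.min_eq_left hle]
      · have hnil : s.drop j = [] := List.drop_eq_nil_of_le (by omega)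
        have ht : t.toList = [] := List.prefix_nil.mp (hnil ▸ hj)
        rw [ht]; exact List.nil_prefix
  · rintro ⟨i, _, hsw⟩
    rw [PySem.Chars.startswith_iff] at hsw
    exact (PySem.Chars.exists_prefix_drop_iff_isIn t.toList s).mp ⟨i.toNat, hsw⟩

-- the scan computes exactly the least matching rank (9 if none matches)
lemma pvScan_eq (s : List Char) (k : Nat) (hk : k ≤ 9)
    (hup : k = 9 ∨ ∃ t ∈ pvGroups.getD k [], PySem.Chars.isIn t.toList s = true)
    (hdn : ∀ tr ∈ pvTokenRank, PySem.Chars.isIn tr.1.toList s = true → k ≤ tr.2) :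
    pvScan s (PySem.List.pyRange 0 ((s.length : Int) + 1) 1) 9 = k := by
  apply Nat.le_antisymm
  · rcases hup with rfl | ⟨t, ht, hin⟩
    · exact pvScan_le _ _ _
    · have hk9 : k < 9 := by
        by_contra h
        have : pvGroups.getD k [] = [] := by interval_cases k <;> simp_all [pvGroups]
        rw [this] at ht; cases ht
      have htr : (t, k) ∈ pvTokenRank := pvGroups_complete k hk9 t ht
      obtain ⟨i, hi, hsw⟩ := (pvMatched_iff s t).mp hin
      exact pvScan_le_of_mem s _ 9 i (t, k) hi htr hsw
  · rcases pvScan_cases s (PySem.List.pyRange 0 ((s.length : Int) + 1) 1) 9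
      with h | ⟨i, hi, tr, htr, hsw, he⟩
    · omega
    · rw [he]
      refine hdn tr htr ?_
      exact (pvMatched_iff s tr.1).mpr ⟨i, hi, hsw⟩

-- uniform lower-bound builder from A's failed branches
lemma pvHdn_of (s : List Char) (k : Nat)
    (hfalse : ∀ j, j < k → ∀ t ∈ pvGroups.getD j [], PySem.Chars.isIn t.toList s = false) :
    ∀ tr ∈ pvTokenRank, PySem.Chars.isIn tr.1.toList s = true → k ≤ tr.2 := by
  intro tr htr hin
  by_contra hlt
  push_neg at hlt
  obtain ⟨_, hg⟩ := pvTokens_sound tr htr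
  have := hfalse tr.2 hlt tr.1 hg
  rw [this] at hin; cases hin

-- helper: a failed 'any' branch of A means every token of that group is absent
lemma pvGroupFalse (s : List Char) (l : List String)
    (h : ¬ (l.any (fun token => PySem.Chars.isIn token.toList s) = true)) :
    ∀ t ∈ l, PySem.Chars.isIn t.toList s = false := by
  intro t ht
  by_contra hne
  exact h (List.any_eq_true.mpr ⟨t, ht, by simpa using hne⟩)

-- ===== VERDICT (by name: the statement is the Claim_ definition above) =====
theorem baseline_specialty_py_spec : Claim_equal_baseline_specialty_py := by
  intro text _
  unfold Spec_baseline_specialty_py baseline_specialty_py baseline_specialty_py_alt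
  simp only [PySem.Str.isIn_eq, PySem.Str.len_eq]
  set s : List Char := (PySem.Str.lower text).toList with hs
  rw [show pvSpecs.length - 1 = 9 from rfl]
  split_ifs with h0 h1 h2 h3 h4 h5 h6 h7 h8
  · rw [pvScan_eq s 0 (by omega) (Or.inr (List.any_eq_true.mp h0))
        (pvHdn_of s 0 (by intro j hj t ht; omega))]
    rfl
  · rw [pvScan_eq s 1 (by omega) (Or.inr (List.any_eq_true.mp h1))
        (pvHdn_of s 1 (by
          intro j hj t ht
          interval_cases j
          · exact pvGroupFalse s _ h0 t ht))]
    rfl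
  · rw [pvScan_eq s 2 (by omega) (Or.inr (List.any_eq_true.mp h2))
        (pvHdn_of s 2 (by
          intro j hj t ht
          interval_cases j
          · exact pvGroupFalse s _ h0 t ht
          · exact pvGroupFalse s _ h1 t ht))]
    rfl
  · rw [pvScan_eq s 3 (by omega) (Or.inr (List.any_eq_true.mp h3))
        (pvHdn_of s 3 (by
          intro j hj t ht
          interval_cases j
          · exact pvGroupFalse s _ h0 t ht
          · exact pvGroupFalse s _ h1 t ht
          · exact pvGroupFalse s _ h2 t ht))]
    rfl
  · rw [pvScan_eq s 4 (by omega) (Or.inr (List.any_eq_true.mp h4))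
        (pvHdn_of s 4 (by
          intro j hj t ht
          interval_cases j
          · exact pvGroupFalse s _ h0 t ht
          · exact pvGroupFalse s _ h1 t ht
          · exact pvGroupFalse s _ h2 t ht
          · exact pvGroupFalse s _ h3 t ht))]
    rfl
  · rw [pvScan_eq s 5 (by omega) (Or.inr (List.any_eq_true.mp h5))
        (pvHdn_of s 5 (by
          intro j hj t ht
          interval_cases j
          · exact pvGroupFalse s _ h0 t ht
          · exact pvGroupFalse s _ h1 t ht
          · exact pvGroupFalse s _ h2 t ht
          · exact pvGroupFalse s _ h3 t ht
          · exact pvGroupFalse s _ h4 t ht))]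
    rfl
  · rw [pvScan_eq s 6 (by omega) (Or.inr (List.any_eq_true.mp h6))
        (pvHdn_of s 6 (by
          intro j hj t ht
          interval_cases j
          · exact pvGroupFalse s _ h0 t ht
          · exact pvGroupFalse s _ h1 t ht
          · exact pvGroupFalse s _ h2 t ht
          · exact pvGroupFalse s _ h3 t ht
          · exact pvGroupFalse s _ h4 t ht
          · exact pvGroupFalse s _ h5 t ht))]
    rfl
  · rw [pvScan_eq s 7 (by omega) (Or.inr (List.any_eq_true.mp h7))
        (pvHdn_of s 7 (by
          intro j hj t ht
          interval_cases j
          · exact pvGroupFalse s _ h0 t ht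
          · exact pvGroupFalse s _ h1 t ht
          · exact pvGroupFalse s _ h2 t ht
          · exact pvGroupFalse s _ h3 t ht
          · exact pvGroupFalse s _ h4 t ht
          · exact pvGroupFalse s _ h5 t ht
          · exact pvGroupFalse s _ h6 t ht))]
    rfl
  · rw [pvScan_eq s 8 (by omega) (Or.inr (List.any_eq_true.mp h8))
        (pvHdn_of s 8 (by
          intro j hj t ht
          interval_cases j
          · exact pvGroupFalse s _ h0 t ht
          · exact pvGroupFalse s _ h1 t ht
          · exact pvGroupFalse s _ h2 t ht
          · exact pvGroupFalse s _ h3 t ht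
          · exact pvGroupFalse s _ h4 t ht
          · exact pvGroupFalse s _ h5 t ht
          · exact pvGroupFalse s _ h6 t ht
          · exact pvGroupFalse s _ h7 t ht))]
    rfl
  · rw [pvScan_eq s 9 (by omega) (Or.inl rfl)
        (pvHdn_of s 9 (by
          intro j hj t ht
          interval_cases j
          · exact pvGroupFalse s _ h0 t ht
          · exact pvGroupFalse s _ h1 t ht
          · exact pvGroupFalse s _ h2 t ht
          · exact pvGroupFalse s _ h3 t ht
          · exact pvGroupFalse s _ h4 t ht
          · exact pvGroupFalse s _ h5 t ht
          · exact pvGroupFalse s _ h6 t ht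
          · exact pvGroupFalse s _ h7 t ht
          · exact pvGroupFalse s _ h8 t ht))]
    rfl
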